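-- pv_equiv track=rewrite | github.com/zzx060827/dsa2025 | openjudge/23660/2400012630.py | count
-- ===== SOURCE A (Python) =====
-- def count(nums) :
--     dp=[0]*7
--     dp[0]=1
--
--     for num in nums :
--         new_dp=dp[:]
--         for r in range(7):
--             new_r=(r+num)%7
--             new_dp[new_r]+=dp[r]
--         dp=new_dp
--     return dp[0]
-- ===== SOURCE B (Python) =====
-- def count(nums):
--     sums = [0]
--     for x in nums:
--         sums = sums + [s + x for s in sums]
--     return sum(1 for s in sums if s % 7 == 0)
-- ===== Notes on version B (the rewrite author's own statement) =====
-- stated objective: simpler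
-- what changed: Replaced the 7-entry residue DP table with direct enumeration: build the list of all subset sums and count those divisible by 7.
import Mathlib
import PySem

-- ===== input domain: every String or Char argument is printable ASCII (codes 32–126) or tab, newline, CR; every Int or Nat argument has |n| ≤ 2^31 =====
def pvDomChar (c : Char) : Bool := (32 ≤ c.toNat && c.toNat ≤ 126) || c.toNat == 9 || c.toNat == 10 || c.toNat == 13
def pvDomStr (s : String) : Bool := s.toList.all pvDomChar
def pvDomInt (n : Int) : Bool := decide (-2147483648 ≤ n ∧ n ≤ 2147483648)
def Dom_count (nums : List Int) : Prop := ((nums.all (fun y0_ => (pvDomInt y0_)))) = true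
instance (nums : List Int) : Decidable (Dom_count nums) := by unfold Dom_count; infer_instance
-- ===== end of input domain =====

-- B replaces the 7-entry residue DP with direct enumeration of all subset sums (simpler structure, not faster).

-- ===== PORT A =====
-- inner loop of A: new_dp = dp[:]; for r in range(7): new_dp[(r+num)%7] += dp[r]
def innerA (dp : List Int) (num : Int) : List Int :=
  (List.range 7).foldl (fun new_dp (r : Nat) =>
    let new_r := (PySem.Int.mod ((r : Int) + num) 7).toNat
    new_dp.set new_r (new_dp.getD new_r 0 + dp.getD r 0)) dp

def count (nums : List Int) : Int :=
  let dp0 : List Int := (List.replicate 7 (0 : Int)).set 0 1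
  let dp := nums.foldl (fun dp num => innerA dp num) dp0
  dp.getD 0 0

-- ===== PORT B =====
def count_alt (nums : List Int) : Int :=
  let sums := nums.foldl (fun sums x => sums ++ sums.map (fun s => s + x)) [(0 : Int)]
  ((sums.filter (fun s => PySem.Int.mod s 7 == 0)).length : Int)

-- ===== PRECONDITION & SPEC =====
def Spec_count (nums : List Int) (out : Int) : Prop := out = count_alt nums
instance (nums : List Int) (out : Int) : Decidable (Spec_count nums out) := by unfold Spec_count; infer_instance

-- ===== CLAIM (what is proved, stated in full; the proofs are below) =====
def Claim_equal_count : Prop := ∀ (nums : List Int), Dom_count nums → Spec_count nums (count nums)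

-- ===== LEMMAS AND PROOFS =====

-- number of elements of l whose Python residue mod 7 is i
def cnt (l : List Int) (i : Int) : Int :=
  ((l.filter (fun s => PySem.Int.mod s 7 == i)).length : Int)

lemma emod7_add' (a num k : Int) (_hm : num % 7 = k) : (a + num) % 7 = (a + k) % 7 := by omega
lemma emod7_sub' (a num k : Int) (_hm : num % 7 = k) : (a - num) % 7 = (a - k) % 7 := by omega
lemma emod7_neg' (num k : Int) (_hm : num % 7 = k) : (-num) % 7 = (-k) % 7 := by omega

set_option maxHeartbeats 2000000 in
lemma innerA_length (dp : List Int) (num : Int) (hlen : dp.length = 7) :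
    (innerA dp num).length = 7 := by
  match dp, hlen with
  | [a0, a1, a2, a3, a4, a5, a6], _ =>
    obtain ⟨k, hk0, hk7, hm⟩ : ∃ k : Int, 0 ≤ k ∧ k < 7 ∧ num % 7 = k :=
      ⟨_, Int.emod_nonneg _ (by norm_num), Int.emod_lt_of_pos _ (by norm_num), rfl⟩
    interval_cases k <;>
      norm_num [innerA, List.range, List.range.loop, List.foldl,
            hm, emod7_add' _ num _ hm, List.set, Int.toNat]

set_option maxHeartbeats 2000000 in
lemma innerA_getD (dp : List Int) (num : Int) (hlen : dp.length = 7)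
    (i : Nat) (hi : i < 7) :
    (innerA dp num).getD i 0 =
      dp.getD i 0 + dp.getD (PySem.Int.mod ((i : Int) - num) 7).toNat 0 := by
  match dp, hlen with
  | [a0, a1, a2, a3, a4, a5, a6], _ =>
    obtain ⟨k, hk0, hk7, hm⟩ : ∃ k : Int, 0 ≤ k ∧ k < 7 ∧ num % 7 = k :=
      ⟨_, Int.emod_nonneg _ (by norm_num), Int.emod_lt_of_pos _ (by norm_num), rfl⟩
    interval_cases i <;> interval_cases k <;>
      norm_num [innerA, List.range, List.range.loop, List.foldl,
            hm, emod7_add' _ num _ hm, emod7_sub' _ num _ hm, emod7_neg' num _ hm,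
            List.set, List.getD, Int.toNat]

lemma cnt_append (l l' : List Int) (i : Int) :
    cnt (l ++ l') i = cnt l i + cnt l' i := by
  simp [cnt, List.filter_append]

lemma pred_shift (s x i : Int) (h0 : 0 ≤ i) (h7 : i < 7) :
    (PySem.Int.mod (s + x) 7 == i) = (PySem.Int.mod s 7 == PySem.Int.mod (i - x) 7) := by
  rw [PySem.Int.mod_eq_emod_of_pos (by norm_num), PySem.Int.mod_eq_emod_of_pos (by norm_num),
      PySem.Int.mod_eq_emod_of_pos (by norm_num)]
  have key : (s + x) % 7 = i ↔ s % 7 = (i - x) % 7 := by omega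
  by_cases h : (s + x) % 7 = i
  · simp [h, key.mp h]
  · have h' : ¬ s % 7 = (i - x) % 7 := fun hh => h (key.mpr hh)
    simp [h, h']

lemma cnt_map (l : List Int) (x i : Int) (h0 : 0 ≤ i) (h7 : i < 7) :
    cnt (l.map (fun s => s + x)) i = cnt l (PySem.Int.mod (i - x) 7) := by
  induction l with
  | nil => simp [cnt]
  | cons s t ih =>
    simp only [cnt, List.map_cons, List.filter_cons] at ih ⊢
    rw [pred_shift s x i h0 h7]
    cases h : (PySem.Int.mod s 7 == PySem.Int.mod (i - x) 7) with
    | false => simpa [h] using ih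
    | true => simp only [if_true, List.length_cons]; push_cast at ih ⊢; omega

lemma loop_inv (nums : List Int) (sums dp : List Int)
    (hlen : dp.length = 7)
    (hinv : ∀ i : Nat, i < 7 → dp.getD i 0 = cnt sums (i : Int)) :
    ∀ i : Nat, i < 7 →
      (nums.foldl (fun dp num => innerA dp num) dp).getD i 0 =
        cnt (nums.foldl (fun sums x => sums ++ sums.map (fun s => s + x)) sums) (i : Int) := by
  induction nums generalizing sums dp with
  | nil => simpa using hinv
  | cons x rest ih =>
    intro i hi
    simp only [List.foldl]
    refine ih (sums ++ sums.map (fun s => s + x)) (innerA dp x)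
      (innerA_length dp x hlen) ?_ i hi
    intro j hj
    rw [innerA_getD dp x hlen j hj, cnt_append,
        cnt_map sums x (j : Int) (by positivity) (by exact_mod_cast hj)]
    have hjb0 : 0 ≤ PySem.Int.mod ((j : Int) - x) 7 := PySem.Int.mod_nonneg _ (by norm_num)
    have hjb7 : PySem.Int.mod ((j : Int) - x) 7 < 7 := PySem.Int.mod_lt _ (by norm_num)
    have hcast : ((PySem.Int.mod ((j : Int) - x) 7).toNat : Int) = PySem.Int.mod ((j : Int) - x) 7 :=
      Int.toNat_of_nonneg hjb0
    rw [hinv j hj, hinv (PySem.Int.mod ((j : Int) - x) 7).toNat (by omega), hcast]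

-- ===== VERDICT (by name: the statement is the Claim_ definition above) =====
theorem count_spec : Claim_equal_count := by
  intro nums _
  unfold Spec_count count count_alt
  have h := loop_inv nums [(0 : Int)] ((List.replicate 7 (0 : Int)).set 0 1)
    (by decide) (by intro i hi; interval_cases i <;> decide) 0 (by norm_num)
  simpa [cnt] using h
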